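-- pv_equiv track=rewrite | github.com/lufinkey/battery-decky-plugin | backend/utils.py | skip_to_occurance_of_chars
-- ===== SOURCE A (Python) =====
-- def skip_to_occurance_of_chars(data: str, offset: int, chars: str) -> int:
-- 	data_len = len(data)
-- 	while offset < data_len:
-- 		c = data[offset]
-- 		if chars.find(c) != -1:
-- 			break
-- 		offset += 1
-- 	return offset
-- ===== SOURCE B (Python) =====
-- def skip_to_occurance_of_chars(data: str, offset: int, chars: str) -> int:
-- 	data_len = len(data)
-- 	if offset >= data_len:
-- 		return offset
-- 	hits = []
-- 	for ch in chars:
-- 		i = data.find(ch, offset)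
-- 		if i != -1:
-- 			hits.append(i)
-- 	return min(hits) if hits else data_len
-- ===== Notes on version B (the rewrite author's own statement) =====
-- stated objective: idiomatic
-- what changed: B replaces A's character-by-character while loop with one str.find(ch, offset) call per delimiter character and returns the minimum of the found indices (offset if offset >= len(data), len(data) if none found), delegating the scan to the built-in instead of indexing data by hand.
-- intended difference: On a negative offset with some character of chars occurring in data, A indexes end-relatively, rescans already-visited positions and can return a negative index (e.g. A('ab',-1,'b') = -1), while B returns the first delimiter index at or after the len-relative clamped start (B('ab',-1,'b') = 1), the intended 'scan forward for a delimiter' meaning. — e.g. on skip_to_occurance_of_chars("ab", -1, "b"): A returns -1, B returns 1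
import Mathlib
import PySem

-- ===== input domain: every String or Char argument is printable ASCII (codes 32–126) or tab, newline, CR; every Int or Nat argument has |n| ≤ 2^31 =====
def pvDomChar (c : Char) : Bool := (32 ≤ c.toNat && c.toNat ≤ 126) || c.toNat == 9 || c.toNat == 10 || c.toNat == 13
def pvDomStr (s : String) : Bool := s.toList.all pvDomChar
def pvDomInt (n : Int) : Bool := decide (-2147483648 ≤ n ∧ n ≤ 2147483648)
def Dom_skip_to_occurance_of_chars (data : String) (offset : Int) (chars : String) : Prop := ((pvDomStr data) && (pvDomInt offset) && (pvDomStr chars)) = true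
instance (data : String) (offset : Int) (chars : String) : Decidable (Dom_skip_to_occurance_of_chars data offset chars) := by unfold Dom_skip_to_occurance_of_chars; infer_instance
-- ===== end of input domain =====

-- B replaces A's index-by-index while loop by one str.find per delimiter character plus a minimum;
-- same return value on Pre_ except on the stated negative-offset region D_.

-- ===== PORT A =====
-- the Python 'while offset < data_len' loop, step for step; the fuel argument is exactly the number
-- of remaining loop iterations (data_len - offset), so fuel = 0 iff the loop condition fails
def skipLoopA (data chars : List Char) : Nat → Int → Int
  | 0, offset => offset
  | fuel + 1, offset =>
    match PySem.List.pyGet? data offset with      -- c = data[offset]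
    | some c =>
      if PySem.Chars.find chars [c] ≠ -1 then offset    -- if chars.find(c) != -1: break
      else skipLoopA data chars fuel (offset + 1)       -- offset += 1
    | none => offset                              -- Python raises IndexError here; excluded by Pre_

def skip_to_occurance_of_chars (data : String) (offset : Int) (chars : String) : Int :=
  skipLoopA data.toList chars.toList ((data.toList.length : Int) - offset).toNat offset

-- ===== PORT B =====
def skip_to_occurance_of_chars_alt (data : String) (offset : Int) (chars : String) : Int :=
  let dl : Int := (data.toList.length : Int)      -- data_len = len(data)
  if dl ≤ offset then offset                      -- if offset >= data_len: return offset
  else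
    -- hits = [];  for ch in chars: i = data.find(ch, offset);  if i != -1: hits.append(i)
    let hits := chars.toList.foldl (fun acc ch =>
      let i := PySem.Chars.findFrom data.toList [ch] offset none
      if i ≠ -1 then acc ++ [i] else acc) ([] : List Int)
    -- return min(hits) if hits else data_len
    match PySem.List.min? hits (fun x => x) with
    | some m => m
    | none => dl

-- ===== PRECONDITION & SPEC =====
-- Pre_ excludes only the inputs where A raises IndexError (offset < -len(data), where data[offset] fails).
def Pre_skip_to_occurance_of_chars (data : String) (offset : Int) (chars : String) : Prop :=
  -(data.toList.length : Int) ≤ offset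
instance (data : String) (offset : Int) (chars : String) : Decidable (Pre_skip_to_occurance_of_chars data offset chars) := by unfold Pre_skip_to_occurance_of_chars; infer_instance

def pvWitness_skip_to_occurance_of_chars : String × Int × String := ("abc", 1, "c")

-- On a negative offset with some character of data occurring in chars, A applies Python's
-- end-relative indexing, rescans already-visited positions and can return a negative index, while B
-- returns the index of the first delimiter at or after the len-relative clamped start, which is the
-- intended 'scan forward for a delimiter' meaning.
def D_skip_to_occurance_of_chars (data : String) (offset : Int) (chars : String) : Prop :=
  offset < 0 ∧ ∃ c ∈ data.toList, c ∈ chars.toList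
instance (data : String) (offset : Int) (chars : String) : Decidable (D_skip_to_occurance_of_chars data offset chars) := by unfold D_skip_to_occurance_of_chars; infer_instance

def Spec_skip_to_occurance_of_chars (data : String) (offset : Int) (chars : String) (out : Int) : Prop := ¬ D_skip_to_occurance_of_chars data offset chars → out = skip_to_occurance_of_chars_alt data offset chars
instance (data : String) (offset : Int) (chars : String) (out : Int) : Decidable (Spec_skip_to_occurance_of_chars data offset chars out) := by unfold Spec_skip_to_occurance_of_chars; infer_instance

def pvDiffWitness_skip_to_occurance_of_chars : String × Int × String := ("ab", -1, "b")
def pvDiffWitnessOut_skip_to_occurance_of_chars : Int × Int := (-1, 1)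

-- ===== CLAIM (what is proved, stated in full; the proofs are below) =====
def Claim_unchanged_skip_to_occurance_of_chars : Prop := ∀ (data : String) (offset : Int) (chars : String), Dom_skip_to_occurance_of_chars data offset chars → Pre_skip_to_occurance_of_chars data offset chars → Spec_skip_to_occurance_of_chars data offset chars (skip_to_occurance_of_chars data offset chars)
def Claim_exact_skip_to_occurance_of_chars : Prop := ∀ (data : String) (offset : Int) (chars : String), Dom_skip_to_occurance_of_chars data offset chars → Pre_skip_to_occurance_of_chars data offset chars → D_skip_to_occurance_of_chars data offset chars → skip_to_occurance_of_chars data offset chars ≠ skip_to_occurance_of_chars_alt data offset chars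
def Claim_changed_skip_to_occurance_of_chars : Prop := Dom_skip_to_occurance_of_chars (pvDiffWitness_skip_to_occurance_of_chars.1) (pvDiffWitness_skip_to_occurance_of_chars.2.1) (pvDiffWitness_skip_to_occurance_of_chars.2.2) ∧ Pre_skip_to_occurance_of_chars (pvDiffWitness_skip_to_occurance_of_chars.1) (pvDiffWitness_skip_to_occurance_of_chars.2.1) (pvDiffWitness_skip_to_occurance_of_chars.2.2) ∧ D_skip_to_occurance_of_chars (pvDiffWitness_skip_to_occurance_of_chars.1) (pvDiffWitness_skip_to_occurance_of_chars.2.1) (pvDiffWitness_skip_to_occurance_of_chars.2.2) ∧ skip_to_occurance_of_chars (pvDiffWitness_skip_to_occurance_of_chars.1) (pvDiffWitness_skip_to_occurance_of_chars.2.1) (pvDiffWitness_skip_to_occurance_of_chars.2.2) = pvDiffWitnessOut_skip_to_occurance_of_chars.1 ∧ skip_to_occurance_of_chars_alt (pvDiffWitness_skip_to_occurance_of_chars.1) (pvDiffWitness_skip_to_occurance_of_chars.2.1) (pvDiffWitness_skip_to_occurance_of_chars.2.2) = pvDiffWitnessOut_skip_to_occurance_of_chars.2 ∧ pvDiffWitnessOut_skip_to_occurance_of_chars.1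 ≠ pvDiffWitnessOut_skip_to_occurance_of_chars.2

-- ===== LEMMAS AND PROOFS =====

-- chars.find(c) != -1 is exactly membership of the single character
theorem find_single_ne_neg_one_iff (chars : List Char) (c : Char) :
    PySem.Chars.find chars [c] ≠ -1 ↔ c ∈ chars := by
  rw [PySem.Chars.find_ne_neg_one_iff, List.singleton_infix_iff]

-- a singleton prefix of a drop pins down one character
theorem singleton_prefix_drop {d : List Char} {t : Nat} (ht : t < d.length) (ch : Char) :
    [ch] <+: d.drop t ↔ d[t] = ch := by
  rw [← List.getElem_cons_drop ht]
  constructor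
  · rintro ⟨l, hl⟩
    have hl' : ch :: l = d[t] :: d.drop (t + 1) := hl
    exact (List.cons_eq_cons.1 hl').1.symm
  · rintro rfl
    exact ⟨d.drop (t + 1), rfl⟩

-- for a character present in d, str.find of its singleton is the first index where it occurs
theorem find_single_eq (d : List Char) (ch : Char) (h : ch ∈ d) :
    ∃ t : Nat, PySem.Chars.find d [ch] = (t : Int) ∧ t < d.length ∧ d[t]? = some ch ∧
      ∀ i : Nat, i < t → d[i]? ≠ some ch := by
  have h0 : 0 ≤ PySem.Chars.find d [ch] :=
    (PySem.Chars.find_nonneg_iff d [ch]).2 ((List.singleton_infix_iff ch d).2 h)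
  obtain ⟨hpre, hmin⟩ := PySem.Chars.find_spec h0
  have ht : PySem.Chars.find d [ch] = (((PySem.Chars.find d [ch]).toNat : Nat) : Int) :=
    (Int.toNat_of_nonneg h0).symm
  set t := (PySem.Chars.find d [ch]).toNat with htdef
  have htlt : t < d.length := by
    by_contra hge
    rw [List.drop_eq_nil_of_le (by omega), List.prefix_nil] at hpre
    simp at hpre
  refine ⟨t, ht, htlt, ?_, ?_⟩
  · rw [List.getElem?_eq_getElem htlt, (singleton_prefix_drop htlt ch).1 hpre]
  · intro i hi hcontra
    have hilt : i < d.length := by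
      rcases List.getElem?_eq_some_iff.1 hcontra with ⟨h', _⟩; exact h'
    apply hmin i hi
    rw [singleton_prefix_drop hilt ch]
    rw [List.getElem?_eq_getElem hilt] at hcontra
    exact Option.some.inj hcontra

-- a singleton find of an absent character is -1 for EVERY start value (negative starts clamp)
theorem findFrom_absent (d : List Char) (ch : Char) (h : ch ∉ d) (s : Int) :
    PySem.Chars.findFrom d [ch] s none = -1 := by
  have habs : ∀ a b : Nat, PySem.Chars.find (List.drop a (List.take b d)) [ch] = -1 := by
    intro a b
    rw [PySem.Chars.find_eq_neg_one_iff, List.singleton_infix_iff]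
    intro hmem
    exact h (List.mem_of_mem_take (List.mem_of_mem_drop hmem))
  have habs' : ∀ a : Nat, PySem.Chars.find (List.drop a d) [ch] = -1 := by
    intro a
    rw [PySem.Chars.find_eq_neg_one_iff, List.singleton_infix_iff]
    intro hmem
    exact h (List.mem_of_mem_drop hmem)
  simp [PySem.Chars.findFrom, habs, habs']

-- the reference value: first index ≥ k holding a character of chars, else len(data)
def refIdx (data chars : List Char) (k : Nat) : Int :=
  match (data.drop k).findIdx? (fun c => decide (c ∈ chars)) with
  | some j => ((k + j : Nat) : Int)
  | none => (data.length : Int)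

-- A's loop from a nonnegative position computes refIdx
theorem skipLoopA_nonneg (data chars : List Char) :
    ∀ (f k : Nat), f = data.length - k → k ≤ data.length →
      skipLoopA data chars f (k : Int) = refIdx data chars k := by
  intro f
  induction f with
  | zero =>
    intro k hf hk
    have hk' : k = data.length := by omega
    subst hk'
    unfold refIdx
    rw [List.drop_length, List.findIdx?_nil]
    rfl
  | succ f ih =>
    intro k hf hk
    have hklt : k < data.length := by omega
    show (match PySem.List.pyGet? data (k : Int) with
          | some c => if PySem.Chars.find chars [c] ≠ -1 then (k : Int)
                      else skipLoopA data chars f ((k : Int) + 1)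
          | none => (k : Int)) = refIdx data chars k
    rw [PySem.List.pyGet?_natCast, List.getElem?_eq_getElem hklt]
    show (if PySem.Chars.find chars [data[k]] ≠ -1 then (k : Int)
          else skipLoopA data chars f ((k : Int) + 1)) = refIdx data chars k
    by_cases hc : data[k] ∈ chars
    · rw [if_pos ((find_single_ne_neg_one_iff chars data[k]).2 hc)]
      unfold refIdx
      rw [← List.getElem_cons_drop hklt, List.findIdx?_cons, if_pos (decide_eq_true hc)]
      simp
    · rw [if_neg (by simp [find_single_ne_neg_one_iff, hc])]
      rw [show ((k : Int) + 1) = ((k + 1 : Nat) : Int) by push_cast; ring]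
      rw [ih (k + 1) (by omega) (by omega)]
      unfold refIdx
      conv_rhs => rw [← List.getElem_cons_drop hklt]
      rw [List.findIdx?_cons, if_neg (by simp [hc])]
      cases hF : (data.drop (k + 1)).findIdx? (fun c => decide (c ∈ chars)) with
      | none => simp
      | some j => simp; push_cast; ring

-- B's hits list as a filter-map over the delimiter characters
def hitsOf (data chars : List Char) (offset : Int) : List Int :=
  chars.foldl (fun acc ch =>
    if PySem.Chars.findFrom data [ch] offset none ≠ -1
    then acc ++ [PySem.Chars.findFrom data [ch] offset none] else acc) []

theorem hitsOf_eq_filter (data chars : List Char) (offset : Int) :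
    hitsOf data chars offset =
      (chars.filter (fun ch => decide (PySem.Chars.findFrom data [ch] offset none ≠ -1))).map
        (fun ch => PySem.Chars.findFrom data [ch] offset none) := by
  unfold hitsOf
  simpa using PySem.List.foldl_append_ite
    (fun ch => PySem.Chars.findFrom data [ch] offset none ≠ -1)
    (fun ch => PySem.Chars.findFrom data [ch] offset none) chars []

theorem alt_eq (data : String) (offset : Int) (chars : String)
    (h : ¬ ((data.toList.length : Int) ≤ offset)) :
    skip_to_occurance_of_chars_alt data offset chars =
      match PySem.List.min? (hitsOf data.toList chars.toList offset) (fun x => x) with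
      | some m => m
      | none => (data.toList.length : Int) := by
  unfold skip_to_occurance_of_chars_alt hitsOf
  rw [if_neg h]

theorem hitsOf_empty (data chars : List Char) (offset : Int)
    (h : ∀ ch ∈ chars, ch ∉ data) : hitsOf data chars offset = [] := by
  rw [hitsOf_eq_filter]
  have : chars.filter (fun ch => decide (PySem.Chars.findFrom data [ch] offset none ≠ -1)) = [] := by
    rw [List.filter_eq_nil_iff]
    intro ch hch
    simp [findFrom_absent data ch (h ch hch) offset]
  rw [this, List.map_nil]

-- B's min-of-finds from a nonnegative position computes refIdx too
theorem min_hits_eq_ref (data chars : List Char) (k : Nat) (hk : k ≤ data.length) :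
    (match PySem.List.min? (hitsOf data chars (k : Int)) (fun x => x) with
     | some m => m
     | none => (data.length : Int)) = refIdx data chars k := by
  have hFF : ∀ ch, PySem.Chars.findFrom data [ch] (k : Int) none =
      if PySem.Chars.find (data.drop k) [ch] = -1 then -1
      else (k : Int) + PySem.Chars.find (data.drop k) [ch] :=
    fun ch => PySem.Chars.findFrom_natCast data [ch] k hk
  cases hF : (data.drop k).findIdx? (fun c => decide (c ∈ chars)) with
  | none =>
    have hall : ∀ x ∈ data.drop k, x ∉ chars := by
      intro x hx
      have := List.findIdx?_eq_none_iff.1 hF x hx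
      simpa using this
    have hempty : hitsOf data chars (k : Int) = [] := by
      rw [hitsOf_eq_filter]
      have : chars.filter (fun ch => decide (PySem.Chars.findFrom data [ch] (k : Int) none ≠ -1)) = [] := by
        rw [List.filter_eq_nil_iff]
        intro ch hch
        have hfind : PySem.Chars.find (data.drop k) [ch] = -1 := by
          rw [PySem.Chars.find_eq_neg_one_iff, List.singleton_infix_iff]
          intro hmem; exact hall ch hmem hch
        simp [hFF ch, hfind]
      rw [this, List.map_nil]
    rw [hempty, (PySem.List.min?_eq_none_iff _ _).2 rfl]
    unfold refIdx
    rw [hF]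
  | some j =>
    obtain ⟨hjlt, hpj, hminj⟩ := List.findIdx?_eq_some_iff_getElem.1 hF
    have hjmem : (data.drop k)[j] ∈ chars := by simpa using hpj
    have hfindj : PySem.Chars.find (data.drop k) [(data.drop k)[j]] = (j : Int) := by
      obtain ⟨t, ht, htlt, hget, hmint⟩ := find_single_eq (data.drop k) _ (List.getElem_mem hjlt)
      have h1 : ¬ t < j := by
        intro hlt
        have heq : (data.drop k)[t] = (data.drop k)[j] := by
          rw [List.getElem?_eq_getElem htlt] at hget
          exact Option.some.inj hget
        exact (hminj t hlt) (by rw [heq]; exact hpj)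
      have h2 : ¬ j < t := by
        intro hlt
        exact hmint j hlt (by rw [List.getElem?_eq_getElem hjlt])
      have : t = j := by omega
      rw [this] at ht
      exact ht
    have hch0 : PySem.Chars.findFrom data [(data.drop k)[j]] (k : Int) none = ((k + j : Nat) : Int) := by
      rw [hFF _, if_neg (by rw [hfindj]; omega), hfindj]
      push_cast; ring
    have hmem0 : ((k + j : Nat) : Int) ∈ hitsOf data chars (k : Int) := by
      rw [hitsOf_eq_filter]
      refine List.mem_map.2 ⟨(data.drop k)[j], List.mem_filter.2 ⟨hjmem, ?_⟩, hch0⟩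
      rw [hch0]
      simp only [decide_eq_true_eq]
      omega
    have hlb : ∀ x ∈ hitsOf data chars (k : Int), ((k + j : Nat) : Int) ≤ x := by
      intro x hx
      rw [hitsOf_eq_filter] at hx
      obtain ⟨ch, hchf, rfl⟩ := List.mem_map.1 hx
      obtain ⟨hchmem, hcond⟩ := List.mem_filter.1 hchf
      have hne : PySem.Chars.findFrom data [ch] (k : Int) none ≠ -1 := by simpa using hcond
      rw [hFF ch] at hne ⊢
      by_cases hfd : PySem.Chars.find (data.drop k) [ch] = -1
      · simp [hfd] at hne
      · rw [if_neg hfd]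
        have hchd : ch ∈ data.drop k := by
          have h0 : 0 ≤ PySem.Chars.find (data.drop k) [ch] := by
            have := PySem.Chars.neg_one_le_find (data.drop k) [ch]
            omega
          exact (List.singleton_infix_iff ch _).1 ((PySem.Chars.find_nonneg_iff _ _).1 h0)
        obtain ⟨t, ht, htlt, hget, _⟩ := find_single_eq (data.drop k) ch hchd
        have hjt : j ≤ t := by
          by_contra hlt
          push_neg at hlt
          apply hminj t hlt
          have heq : (data.drop k)[t] = ch := by
            rw [List.getElem?_eq_getElem htlt] at hget
            exact Option.some.inj hget
          rw [heq]
          exact decide_eq_true hchmem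
        rw [ht]; push_cast; omega
    cases hmn : PySem.List.min? (hitsOf data chars (k : Int)) (fun x => x) with
    | none =>
      rw [(PySem.List.min?_eq_none_iff _ _).1 hmn] at hmem0
      simp at hmem0
    | some m =>
      have h1 := PySem.List.min?_mem hmn
      have h2 := PySem.List.min?_isMin hmn _ hmem0
      have h3 := hlb m h1
      have hm : m = ((k + j : Nat) : Int) := le_antisymm h2 h3
      unfold refIdx
      rw [hF]
      simpa using hm

-- A's loop from the negative position -m: either it breaks while the index is still negative
-- (a delimiter among the last m characters) or it reaches index 0 and rescans from the start
theorem skipLoopA_negD (data chars : List Char) :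
    ∀ m : Nat, m ≤ data.length →
      skipLoopA data chars (data.length + m) (-(m : Int)) =
        match (data.drop (data.length - m)).findIdx? (fun c => decide (c ∈ chars)) with
        | some j => ((data.length - m + j : Nat) : Int) - (data.length : Int)
        | none => refIdx data chars 0 := by
  intro m
  induction m with
  | zero =>
    intro _
    rw [show (-(0 : Nat) : Int) = ((0 : Nat) : Int) by simp, Nat.add_zero]
    rw [skipLoopA_nonneg data chars _ 0 (by omega) (by omega)]
    rw [Nat.sub_zero, List.drop_length, List.findIdx?_nil]
  | succ m ih =>
    intro hm
    have hst : data.length - (m + 1) < data.length := by omega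
    rw [show data.length + (m + 1) = (data.length + m) + 1 by omega]
    show (match PySem.List.pyGet? data (-((m + 1 : Nat) : Int)) with
          | some c => if PySem.Chars.find chars [c] ≠ -1 then (-((m + 1 : Nat) : Int))
                      else skipLoopA data chars (data.length + m) ((-((m + 1 : Nat) : Int)) + 1)
          | none => (-((m + 1 : Nat) : Int))) = _
    rw [PySem.List.pyGet?_neg_natCast data (m + 1) (by omega) hm, List.getElem?_eq_getElem hst]
    show (if PySem.Chars.find chars [data[data.length - (m + 1)]] ≠ -1 then (-((m + 1 : Nat) : Int))
          else skipLoopA data chars (data.length + m) ((-((m + 1 : Nat) : Int)) + 1)) = _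
    conv_rhs => rw [← List.getElem_cons_drop hst, List.findIdx?_cons]
    by_cases hc : data[data.length - (m + 1)] ∈ chars
    · rw [if_pos ((find_single_ne_neg_one_iff chars _).2 hc), if_pos (decide_eq_true hc)]
      show -((m + 1 : Nat) : Int) = ((data.length - (m + 1) + 0 : Nat) : Int) - (data.length : Int)
      omega
    · rw [if_neg (by simp [find_single_ne_neg_one_iff, hc]), if_neg (by simp [hc])]
      rw [show (-((m + 1 : Nat) : Int)) + 1 = -((m : Nat) : Int) by push_cast; ring]
      rw [ih (by omega)]
      rw [show data.length - (m + 1) + 1 = data.length - m by omega]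
      cases hF : (data.drop (data.length - m)).findIdx? (fun c => decide (c ∈ chars)) with
      | none => rfl
      | some j =>
        simp only [Option.map_some]
        have hjeq : data.length - (m + 1) + (j + 1) = data.length - m + j := by omega
        rw [hjeq]

-- corollary: when no character of data is a delimiter the loop walks all the way to len(data)
theorem skipLoopA_neg (data chars : List Char) (hnc : ∀ c ∈ data, c ∉ chars)
    (m : Nat) (hm : m ≤ data.length) :
    skipLoopA data chars (data.length + m) (-(m : Int)) = (data.length : Int) := by
  rw [skipLoopA_negD data chars m hm]
  rw [List.findIdx?_eq_none_iff.2 (fun x hx => by simp [hnc x (List.mem_of_mem_drop hx)])]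
  unfold refIdx
  rw [List.drop_zero, List.findIdx?_eq_none_iff.2 (fun x hx => by simp [hnc x hx])]

-- str.find's negative start clamps to the len-relative position
theorem findFrom_neg (d sub : List Char) (m : Nat) (h1 : 0 < m) (h2 : m ≤ d.length) :
    PySem.Chars.findFrom d sub (-(m : Int)) none =
      PySem.Chars.findFrom d sub ((d.length - m : Nat) : Int) none := by
  have e1 : (-(m : Int)) + d.length = ((d.length - m : Nat) : Int) := by omega
  simp only [PySem.Chars.findFrom]
  rw [if_pos (by omega : -(m : Int) < 0), if_neg (by omega : ¬ (-(m : Int) + (d.length : Int) < 0)),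
    if_neg (by omega : ¬ (((d.length - m : Nat) : Int) < 0)), e1]

-- ===== VERDICT (by name: the statement is the Claim_ definition above) =====
theorem skip_to_occurance_of_chars_spec : Claim_unchanged_skip_to_occurance_of_chars := by
  intro data offset chars _hdom hpre hnD
  by_cases hge : (data.toList.length : Int) ≤ offset
  · -- offset >= data_len: both return offset unchanged
    unfold skip_to_occurance_of_chars skip_to_occurance_of_chars_alt
    rw [show ((data.toList.length : Int) - offset).toNat = 0 by omega, if_pos hge]
    rfl
  · by_cases h0 : 0 ≤ offset
    · -- main case: 0 ≤ offset < data_len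
      obtain ⟨k, rfl⟩ : ∃ k : Nat, offset = (k : Int) := ⟨offset.toNat, by omega⟩
      unfold skip_to_occurance_of_chars
      rw [show ((data.toList.length : Int) - (k : Int)).toNat = data.toList.length - k by omega]
      rw [skipLoopA_nonneg data.toList chars.toList _ k rfl (by omega)]
      rw [alt_eq data _ chars hge]
      exact (min_hits_eq_ref data.toList chars.toList k (by omega)).symm
    · -- negative offset outside D_: data nonempty and no character of data occurs in chars
      push_neg at h0
      have hD2 : ¬ ∃ c ∈ data.toList, c ∈ chars.toList := by
        intro h
        exact hnD ⟨h0, h⟩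
      push_neg at hD2
      have hnc : ∀ c ∈ data.toList, c ∉ chars.toList := hD2
      have hlen : -(data.toList.length : Int) ≤ offset := hpre
      obtain ⟨m, rfl⟩ : ∃ m : Nat, offset = -((m : Nat) : Int) := ⟨(-offset).toNat, by omega⟩
      unfold skip_to_occurance_of_chars
      rw [show ((data.toList.length : Int) - (-((m : Nat) : Int))).toNat = data.toList.length + m by omega]
      rw [skipLoopA_neg data.toList chars.toList hnc m (by omega)]
      rw [alt_eq data _ chars hge]
      rw [hitsOf_empty data.toList chars.toList _ (fun ch hch hmem => hnc _ hmem hch)]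
      rw [(PySem.List.min?_eq_none_iff _ _).2 rfl]

theorem skip_to_occurance_of_chars_changed : Claim_changed_skip_to_occurance_of_chars := by
  unfold Claim_changed_skip_to_occurance_of_chars pvDiffWitness_skip_to_occurance_of_chars
    pvDiffWitnessOut_skip_to_occurance_of_chars
  refine ⟨by decide, ?_, ?_, by decide, by decide, by decide⟩
  · unfold Pre_skip_to_occurance_of_chars
    decide
  · unfold D_skip_to_occurance_of_chars
    exact ⟨by decide, ⟨'b', by decide, by decide⟩⟩

theorem skip_to_occurance_of_chars_tight : Claim_exact_skip_to_occurance_of_chars := by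
  intro data offset chars _hdom hpre hD
  obtain ⟨h0, c0, hc0d, hc0c⟩ := hD
  have hlen : -(data.toList.length : Int) ≤ offset := hpre
  obtain ⟨m, hm1, hm2, rfl⟩ : ∃ m : Nat, 0 < m ∧ m ≤ data.toList.length ∧ offset = -((m : Nat) : Int) :=
    ⟨(-offset).toNat, by omega, by omega, by omega⟩
  unfold skip_to_occurance_of_chars
  rw [show ((data.toList.length : Int) - (-((m : Nat) : Int))).toNat = data.toList.length + m by omega]
  rw [skipLoopA_negD data.toList chars.toList m hm2]
  rw [alt_eq data _ chars (by omega)]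
  have hcongr : ∀ ch, PySem.Chars.findFrom data.toList [ch] (-((m : Nat) : Int)) none =
      PySem.Chars.findFrom data.toList [ch] ((data.toList.length - m : Nat) : Int) none :=
    fun ch => findFrom_neg data.toList [ch] m hm1 hm2
  have hhits : hitsOf data.toList chars.toList (-((m : Nat) : Int)) =
      hitsOf data.toList chars.toList ((data.toList.length - m : Nat) : Int) := by
    unfold hitsOf
    simp only [hcongr]
  rw [hhits, min_hits_eq_ref data.toList chars.toList (data.toList.length - m) (by omega)]
  cases hF : (data.toList.drop (data.toList.length - m)).findIdx? (fun c => decide (c ∈ chars.toList)) with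
  | none =>
    unfold refIdx
    rw [hF, List.drop_zero]
    cases hF0 : data.toList.findIdx? (fun c => decide (c ∈ chars.toList)) with
    | none =>
      have := List.findIdx?_eq_none_iff.1 hF0 c0 hc0d
      simp [hc0c] at this
    | some q =>
      obtain ⟨hq, -, -⟩ := List.findIdx?_eq_some_iff_getElem.1 hF0
      show ((0 + q : Nat) : Int) ≠ (data.toList.length : Int)
      omega
  | some j =>
    unfold refIdx
    rw [hF]
    show ((data.toList.length - m + j : Nat) : Int) - (data.toList.length : Int) ≠
      ((data.toList.length - m + j : Nat) : Int)
    omega
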